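-- pv_equiv track=rewrite | github.com/js1294/ECM-1400-Programming | CA2/final_tests/ex3.py | five_a_side_selector
-- ===== SOURCE A (Python) =====
-- from math import ceil
--
-- def five_a_side_selector(names: list) -> list:
--     """This will distribute the names list into equal teams. """
--     length_names = len(names)
--     max_team = 5
--     if length_names > 20:
--         max_team = 6
--     number_teams = ceil(length_names / max_team)  # Always rounds up
--     teams = [[] for _ in range(0, number_teams)]
--     index = 0
--
--     for iterations in range(0, length_names):
--         teams[index].append(names[iterations])
--         if index == number_teams - 1:
--             index = 0
--         else:
--             index += 1
--     return teams
-- ===== SOURCE B (Python) =====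
-- from math import ceil
--
-- def five_a_side_selector(names: list) -> list:
--     """Distribute the names list round-robin into equal teams."""
--     length_names = len(names)
--     max_team = 6 if length_names > 20 else 5
--     number_teams = ceil(length_names / max_team)
--     return [names[i::number_teams] for i in range(number_teams)]
-- ===== Notes on version B (the rewrite author's own statement) =====
-- stated objective: idiomatic
-- what changed: Instead of looping over every name with a wrapping team index and appending, B loops over the teams and extracts each team directly as the stride slice names[i::number_teams].
import Mathlib
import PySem

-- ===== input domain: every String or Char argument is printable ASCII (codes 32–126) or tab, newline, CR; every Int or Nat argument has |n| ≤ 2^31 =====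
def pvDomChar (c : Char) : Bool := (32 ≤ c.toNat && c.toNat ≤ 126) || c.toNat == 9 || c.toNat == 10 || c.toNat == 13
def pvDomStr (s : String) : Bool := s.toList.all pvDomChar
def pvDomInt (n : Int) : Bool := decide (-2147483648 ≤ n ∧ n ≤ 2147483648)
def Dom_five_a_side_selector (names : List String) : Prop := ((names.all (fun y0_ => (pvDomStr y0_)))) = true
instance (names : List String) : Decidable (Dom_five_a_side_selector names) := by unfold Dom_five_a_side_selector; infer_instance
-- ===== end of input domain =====

-- B replaces A's per-name loop with a wrapping team index by an idiomatic per-team stride-slice comprehension; same cost.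

-- ===== PORT A =====
def five_a_side_selector (names : List String) : List (List String) :=
  let length_names : Int := names.length
  let max_team : Int := if length_names > 20 then 6 else 5
  -- ceil(length_names / max_team): Python's float division + ceil, exact as ceiling division at these sizes
  let number_teams : Int := -(PySem.Int.floordiv (-length_names) max_team)
  let teams : List (List String) := (PySem.List.pyRange 0 number_teams 1).map (fun _ => ([] : List String))
  let final := (PySem.List.pyRange 0 length_names 1).foldl
    (fun (st : List (List String) × Int) (iterations : Int) =>
      -- teams[index].append(names[iterations]); index is always in range, so the safe modify is exact
      let teams' := st.1.modify st.2.toNat (fun t => t ++ [PySem.List.pyGetD names iterations ""])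
      let index' : Int := if st.2 = number_teams - 1 then 0 else st.2 + 1
      (teams', index'))
    (teams, (0 : Int))
  final.1

-- ===== PORT B =====
def five_a_side_selector_alt (names : List String) : List (List String) :=
  let length_names : Int := names.length
  let max_team : Int := if length_names > 20 then 6 else 5
  let number_teams : Int := -(PySem.Int.floordiv (-length_names) max_team)
  -- [names[i::number_teams] for i in range(number_teams)]
  (PySem.List.pyRange 0 number_teams 1).map
    (fun i => (PySem.List.slice? names (some i) none number_teams).getD [])

-- ===== PRECONDITION & SPEC =====
def Spec_five_a_side_selector (names : List String) (out : List (List String)) : Prop := out = five_a_side_selector_alt names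
instance (names : List String) (out : List (List String)) : Decidable (Spec_five_a_side_selector names out) := by unfold Spec_five_a_side_selector; infer_instance

-- ===== CLAIM (what is proved, stated in full; the proofs are below) =====
def Claim_equal_five_a_side_selector : Prop := ∀ (names : List String), Dom_five_a_side_selector names → Spec_five_a_side_selector names (five_a_side_selector names)

-- ===== LEMMAS AND PROOFS =====

-- team j after the first i names have been distributed round-robin over nt teams
def pvTeam (names : List String) (nt i j : Nat) : List String :=
  ((List.range i).filter (fun p => p % nt == j)).map (fun p => names.getD p "")

theorem pvTeam_succ (names : List String) (nt i j : Nat) :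
    pvTeam names nt (i + 1) j =
      if j = i % nt then pvTeam names nt i j ++ [names.getD i ""] else pvTeam names nt i j := by
  unfold pvTeam
  rw [List.range_succ, List.filter_append, List.map_append]
  by_cases h : i % nt = j
  · rw [if_pos h.symm]
    simp [h]
  · rw [if_neg (fun hh => h hh.symm)]
    simp [h]

-- modifying one slot of a map over range
theorem pv_modify_map_range {α : Type} (m k : Nat) (f : Nat → α) (g : α → α) :
    ((List.range m).map f).modify k g
      = (List.range m).map (fun j => if j = k then g (f j) else f j) := by
  apply List.ext_getElem
  · simp
  · intro n h1 h2
    simp only [List.getElem_modify, List.getElem_map, List.getElem_range]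
    by_cases h : k = n <;> simp [h, eq_comm]

-- the wrapping index of A's loop is i % nt
theorem pv_index_step (nt i : Nat) (hnt : 0 < nt) :
    (if ((i % nt : Nat) : Int) = (nt : Int) - 1 then (0 : Int) else ((i % nt : Nat) : Int) + 1)
      = (((i + 1) % nt : Nat) : Int) := by
  have hr : i % nt < nt := Nat.mod_lt _ hnt
  have hdm : nt * (i / nt) + i % nt = i := Nat.div_add_mod i nt
  by_cases h : i % nt = nt - 1
  · have hm : nt * (i / nt + 1) = nt * (i / nt) + nt := by ring
    have hi : i + 1 = nt * (i / nt + 1) := by omega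
    rw [hi, if_pos (by omega), Nat.mul_mod_right]
    rfl
  · have hlt : i % nt + 1 < nt := by omega
    have hi : i + 1 = nt * (i / nt) + (i % nt + 1) := by omega
    rw [hi, Nat.mul_add_mod, Nat.mod_eq_of_lt hlt, if_neg (by omega)]
    push_cast
    ring

-- invariant of A's loop: after i iterations the teams are the round-robin prefix teams and the index is i % nt
theorem pv_loopA (names : List String) (nt : Nat) (hnt : 0 < nt) (i : Nat) :
    ((List.range i).foldl
      (fun (st : List (List String) × Int) (k : Nat) =>
        (st.1.modify st.2.toNat (fun t => t ++ [PySem.List.pyGetD names ((k : Nat) : Int) ""]),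
         if st.2 = (nt : Int) - 1 then 0 else st.2 + 1))
      ((List.range nt).map (fun j => pvTeam names nt 0 j), (0 : Int)))
    = ((List.range nt).map (fun j => pvTeam names nt i j), ((i % nt : Nat) : Int)) := by
  induction i with
  | zero => simp
  | succ i ih =>
    rw [List.range_succ, List.foldl_append, ih]
    simp only [List.foldl_cons, List.foldl_nil]
    rw [Prod.mk.injEq]
    constructor
    · rw [Int.toNat_natCast, PySem.List.pyGetD_natCast,
        pv_modify_map_range nt (i % nt) (fun j => pvTeam names nt i j)
          (fun t => t ++ [names.getD i ""])]
      apply List.map_congr_left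
      intro j hj
      rw [pvTeam_succ]
    · exact pv_index_step nt i hnt

-- strictly increasing enumeration of the indices p < n with p % nt = j, given an exact count c
theorem pv_filter_range_eq (nt j : Nat) (hnt : 0 < nt) (hj : j < nt) :
    ∀ (n c : Nat), (∀ k, k < c ↔ j + nt * k < n) →
      (List.range n).filter (fun p => p % nt == j) = (List.range c).map (fun k => j + nt * k) := by
  intro n
  induction n with
  | zero =>
    intro c hc
    have : c = 0 := by
      by_contra h
      have := (hc 0).mp (by omega)
      omega
    simp [this]
  | succ n ih =>
    intro c hc
    by_cases h : n % nt = j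
    · -- the new index n belongs to team j
      have hdm : nt * (n / nt) + n % nt = n := Nat.div_add_mod n nt
      set k0 := n / nt with hk0
      have hn : j + nt * k0 = n := by omega
      have hc0 : c = k0 + 1 := by
        have h1 : k0 < c := (hc k0).mpr (by omega)
        by_contra hne
        have h2 : k0 + 1 < c := by omega
        have h3 := (hc (k0 + 1)).mp h2
        have h4 : nt * (k0 + 1) = nt * k0 + nt := by ring
        omega
      rw [hc0, List.range_succ, List.filter_append, List.range_succ, List.map_append,
        ih k0 ?_]
      · simp [h, hn]
      · intro k
        constructor
        · intro hk
          have h5 : nt * (k + 1) ≤ nt * k0 := Nat.mul_le_mul_left nt (by omega)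
          have h6 : nt * (k + 1) = nt * k + nt := by ring
          omega
        · intro hk
          have : nt * k < nt * k0 := by omega
          exact Nat.lt_of_mul_lt_mul_left this
    · -- the new index n is not in team j
      rw [List.range_succ, List.filter_append, ih c ?_]
      · simp [h]
      · intro k
        rw [hc k]
        constructor
        · intro hk
          rcases Nat.lt_or_ge (j + nt * k) n with h' | h'
          · exact h'
          · exfalso
            have he : j + nt * k = n := by omega
            have hmod : n % nt = j := by
              rw [← he, Nat.add_mul_mod_self_left, Nat.mod_eq_of_lt hj]
            exact h hmod
        · omega

-- all stride indices below the exact count are in range, so the filterMap of gets is a map of getDs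
theorem pv_filterMap_range {α : Type} (xs : List α) (d : α) (g : Nat → Nat)
    (c : Nat) (hk : ∀ k, k < c → g k < xs.length) :
    (List.range c).filterMap (fun k => xs[(g k)]?) = (List.range c).map (fun k => xs.getD (g k) d) := by
  induction c with
  | zero => simp
  | succ c ih =>
    rw [List.range_succ, List.filterMap_append, List.map_append,
      ih (fun k h => hk k (by omega))]
    have h := hk c (by omega)
    simp [List.getElem?_eq_getElem h, List.getD_eq_getElem?_getD]

-- the exact count of Python's positive-step slice satisfies the stride bracket
theorem pv_count_iff (n j nt : Nat) (hnt : 0 < nt) (hj : j < n) (k : Nat) :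
    k < ((((n : Int) - (j : Int) + (nt : Int) - 1) / (nt : Int)).toNat) ↔ j + nt * k < n := by
  have hpos : (0 : Int) < (nt : Int) := by omega
  have hnum : (0 : Int) ≤ ((n : Int) - (j : Int) + (nt : Int) - 1) := by omega
  have hdiv : (0 : Int) ≤ ((n : Int) - (j : Int) + (nt : Int) - 1) / (nt : Int) :=
    Int.ediv_nonneg hnum (by omega)
  rw [show (k < (((n : Int) - (j : Int) + (nt : Int) - 1) / (nt : Int)).toNat) ↔
      ((k : Int) + 1 ≤ ((n : Int) - (j : Int) + (nt : Int) - 1) / (nt : Int)) by omega,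
    Int.le_ediv_iff_mul_le hpos]
  have hexp : ((k : Int) + 1) * (nt : Int) = (nt : Int) * (k : Int) + (nt : Int) := by ring
  have hcast : (nt : Int) * (k : Int) = ((nt * k : Nat) : Int) := by push_cast; ring
  omega

-- Python's names[j::nt] (0 ≤ j < nt ≤ len) is exactly team j of the full round-robin distribution
theorem pv_slice_eq_team (names : List String) (nt j : Nat) (hnt : 0 < nt) (hj : j < nt)
    (hle : nt ≤ names.length) :
    (PySem.List.slice? names (some (j : Int)) none (nt : Int)).getD []
      = pvTeam names nt names.length j := by
  have hjn : j < names.length := lt_of_lt_of_le hj hle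
  have hsi : PySem.List.sliceIndices names.length (some (j : Int)) none (nt : Int)
      = ((j : Int), (names.length : Int), (nt : Int)) := by
    unfold PySem.List.sliceIndices
    have h1 : ¬ ((nt : Int) < 0) := by omega
    have h2 : ¬ ((j : Int) < 0) := by omega
    simp only [if_neg h1, if_neg h2]
    rw [min_eq_left (by omega)]
  unfold PySem.List.slice?
  rw [hsi]
  have hstep : ¬ ((nt : Int) = 0) := by omega
  rw [if_neg hstep]
  simp only [if_pos (show (0 : Int) < (nt : Int) by omega),
    if_pos (show (j : Int) < (names.length : Int) by omega)]
  set c := ((((names.length : Int)) - (j : Int) + (nt : Int) - 1) / (nt : Int)).toNat with hc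
  have hiff : ∀ k, k < c ↔ j + nt * k < names.length :=
    fun k => pv_count_iff names.length j nt hnt hjn k
  have hfun : (fun (k : Nat) => names[(((j : Int) + (nt : Int) * ((k : Nat) : Int)).toNat)]?)
      = (fun (k : Nat) => names[(j + nt * k)]?) := by
    funext k
    have hEq : (((j : Int) + (nt : Int) * ((k : Nat) : Int)).toNat) = j + nt * k := by
      omega
    rw [hEq]
  rw [Option.getD_some, hfun,
    pv_filterMap_range names "" (fun k => j + nt * k) c
      (fun k h => (hiff k).mp h)]
  unfold pvTeam
  rw [pv_filter_range_eq nt j hnt hj names.length c hiff, List.map_map]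
  rfl

-- the team count for max_team = 5: -((-n) // 5) equals the Nat ceiling (n + 4) / 5
theorem pv_nt5 (n : Nat) :
    -(PySem.Int.floordiv (-(n : Int)) 5) = (((n + 4) / 5 : Nat) : Int) := by
  rw [PySem.Int.neg_floordiv_neg_eq_iff_of_pos (by omega)]
  constructor <;> push_cast <;> omega

-- the team count for max_team = 6: -((-n) // 6) equals the Nat ceiling (n + 5) / 6
theorem pv_nt6 (n : Nat) :
    -(PySem.Int.floordiv (-(n : Int)) 6) = (((n + 5) / 6 : Nat) : Int) := by
  rw [PySem.Int.neg_floordiv_neg_eq_iff_of_pos (by omega)]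
  constructor <;> push_cast <;> omega

-- the common assembly once the team count is known to be the Nat nt with 0 < nt ≤ len
theorem pv_main (names : List String) (nt : Nat) (hnt : 0 < nt) (hle : nt ≤ names.length) :
    ((PySem.List.pyRange 0 (names.length : Int) 1).foldl
      (fun (st : List (List String) × Int) (iterations : Int) =>
        (st.1.modify st.2.toNat (fun t => t ++ [PySem.List.pyGetD names iterations ""]),
         if st.2 = (nt : Int) - 1 then 0 else st.2 + 1))
      ((PySem.List.pyRange 0 (nt : Int) 1).map (fun _ => ([] : List String)), (0 : Int))).1
    = (PySem.List.pyRange 0 (nt : Int) 1).map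
        (fun i => (PySem.List.slice? names (some i) none (nt : Int)).getD []) := by
  rw [PySem.List.pyRange_zero_natCast names.length, PySem.List.pyRange_zero_natCast nt]
  simp only [List.foldl_map, List.map_map]
  have hinit : (List.range nt).map ((fun _ => ([] : List String)) ∘ (fun (k : Nat) => (k : Int)))
      = (List.range nt).map (fun j => pvTeam names nt 0 j) := rfl
  rw [hinit, pv_loopA names nt hnt names.length]
  apply List.map_congr_left
  intro j hj
  exact (pv_slice_eq_team names nt j hnt (List.mem_range.mp hj) hle).symm

-- ===== VERDICT (by name: the statement is the Claim_ definition above) =====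
theorem five_a_side_selector_spec : Claim_equal_five_a_side_selector := by
  intro names _
  unfold Spec_five_a_side_selector five_a_side_selector five_a_side_selector_alt
  dsimp only
  by_cases hnil : names.length = 0
  · have : names = [] := List.eq_nil_of_length_eq_zero hnil
    subst this
    rfl
  · by_cases h20 : (names.length : Int) > 20
    · simp only [if_pos h20]
      rw [pv_nt6 names.length]
      exact pv_main names ((names.length + 5) / 6) (by omega) (by omega)
    · simp only [if_neg h20]
      rw [pv_nt5 names.length]
      exact pv_main names ((names.length + 4) / 5) (by omega) (by omega)
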